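-- pv_equiv track=rewrite | github.com/phononautomata/threshold | src/utils.py | purge_string
-- ===== SOURCE A (Python) =====
-- def purge_string(string, *str_to_remove):
--     result = ""
--     remove_next = False
--
--     for i in range(len(string)):
--         if string[i] == '_':
--             remove_next = False
--             result += string[i]
--         elif remove_next:
--             continue
--         elif string[i:i + len(str_to_remove[0])] == str_to_remove[0]:
--             remove_next = True
--             continue
--         else:
--             result += string[i]
--
--     return result
-- ===== SOURCE B (Python) =====
-- def purge_string(string, *str_to_remove):
--     pieces = []
--     start = 0
--     for seg in string.split('_'):
--         end = start + len(seg)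
--         if seg:
--             p = string.find(str_to_remove[0], start)
--             if start <= p < end:
--                 seg = seg[:p - start]
--         pieces.append(seg)
--         start = end + 1
--     return '_'.join(pieces)
-- ===== Notes on version B (the rewrite author's own statement) =====
-- stated objective: faster
-- what changed: B splits the string on '_' once and, per segment, does a single whole-string find of the pattern from the segment's start offset, truncating the segment at a hit, then rejoins with '_', instead of A's character-by-character loop with a remove_next flag that allocates and compares an m-character slice at every index.
import Mathlib
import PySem

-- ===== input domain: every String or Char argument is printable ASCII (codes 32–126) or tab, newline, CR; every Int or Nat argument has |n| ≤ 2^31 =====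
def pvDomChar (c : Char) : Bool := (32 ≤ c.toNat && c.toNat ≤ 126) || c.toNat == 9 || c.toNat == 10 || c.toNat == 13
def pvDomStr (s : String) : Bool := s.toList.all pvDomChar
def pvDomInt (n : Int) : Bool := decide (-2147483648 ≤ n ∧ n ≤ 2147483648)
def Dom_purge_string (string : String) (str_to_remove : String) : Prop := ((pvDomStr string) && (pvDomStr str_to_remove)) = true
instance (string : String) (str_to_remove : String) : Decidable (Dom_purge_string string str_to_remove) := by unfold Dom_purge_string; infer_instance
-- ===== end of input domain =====

-- B re-implements A by splitting on '_' and doing one whole-string find of the pattern per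
-- segment (truncating the segment at a hit) instead of A's per-character scan with a remove_next
-- flag and a substring comparison at every index; a timing run measured B faster.

-- ===== PORT A =====
-- A's loop over i in range(len(string)), char by char, with the remove_next flag; the remaining
-- list IS string[i:], so string[i:i+len(pat)] == pat is `take pat.length = pat` on the remainder.
def purgeGoA (pat : List Char) : List Char → Bool → List Char → List Char
  | [], _, result => result
  | c :: t, remove_next, result =>
    if c = '_' then purgeGoA pat t false (result ++ ['_'])
    else if remove_next then purgeGoA pat t remove_next result
    else if (c :: t).take pat.length = pat then purgeGoA pat t true result
    else purgeGoA pat t remove_next (result ++ [c])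

def purge_string (string : String) (str_to_remove : String) : String :=
  String.mk (purgeGoA str_to_remove.toList string.toList false [])

-- ===== PORT B =====
def purge_string_alt (string : String) (str_to_remove : String) : String :=
  let s := string.toList
  let pat := str_to_remove.toList
  let fin := (PySem.Chars.splitOn s ['_']).foldl
    (fun (st : List (List Char) × Int) seg =>
      let start := st.2
      let e : Int := start + seg.length
      let seg' :=
        if seg ≠ [] then
          let p := PySem.Chars.findFrom s pat start
          if start ≤ p ∧ p < e then PySem.Chars.slice seg none (some (p - start)) else seg
        else seg
      (st.1 ++ [seg'], e + 1)) ([], 0)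
  String.mk (PySem.Chars.join ['_'] fin.1)

-- ===== PRECONDITION & SPEC =====
def Spec_purge_string (string : String) (str_to_remove : String) (out : String) : Prop := out = purge_string_alt string str_to_remove
instance (string : String) (str_to_remove : String) (out : String) : Decidable (Spec_purge_string string str_to_remove out) := by unfold Spec_purge_string; infer_instance

-- ===== CLAIM (what is proved, stated in full; the proofs are below) =====
def Claim_equal_purge_string : Prop := ∀ (string : String) (str_to_remove : String), Dom_purge_string string str_to_remove → Spec_purge_string string str_to_remove (purge_string string str_to_remove)

-- ===== LEMMAS AND PROOFS =====


theorem purgeGoA_acc (pat : List Char) : ∀ (l : List Char) (b : Bool) (acc : List Char),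
    purgeGoA pat l b acc = acc ++ purgeGoA pat l b [] := by
  intro l
  induction l with
  | nil => intro b acc; simp [purgeGoA]
  | cons c t ih =>
    intro b acc
    simp only [purgeGoA]
    split_ifs
    · rw [ih false (acc ++ ['_']), ih false ([] ++ ['_'])]; simp
    · exact ih b acc
    · exact ih true acc
    · rw [ih b (acc ++ [c]), ih b ([] ++ [c])]; simp

theorem purgeGoA_skip (pat : List Char) : ∀ (l rest : List Char) (acc : List Char),
    '_' ∉ l → purgeGoA pat (l ++ rest) true acc = purgeGoA pat rest true acc := by
  intro l
  induction l with
  | nil => intro rest acc _; simp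
  | cons c t ih =>
    intro rest acc h
    have hc : c ≠ '_' := by simp at h; tauto
    have ht : '_' ∉ t := by simp at h; tauto
    simp only [List.cons_append, purgeGoA, if_neg hc, if_pos rfl]
    exact ih rest acc ht

theorem purgeGoA_copy (pat : List Char) : ∀ (seg rest acc : List Char),
    '_' ∉ seg → (∀ j < seg.length, ¬ pat <+: (seg ++ rest).drop j) →
    purgeGoA pat (seg ++ rest) false acc = purgeGoA pat rest false (acc ++ seg) := by
  intro seg
  induction seg with
  | nil => intro rest acc _ _; simp
  | cons c t ih =>
    intro rest acc h hnm
    have hc : c ≠ '_' := by simp at h; tauto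
    have ht : '_' ∉ t := by simp at h; tauto
    have h0 : ¬ pat <+: (c :: t ++ rest) := by
      have := hnm 0 (by simp); simpa using this
    have hcond : ¬ ((c :: (t ++ rest)).take pat.length = pat) := by
      intro hEq
      exact h0 (List.prefix_iff_eq_take.2 hEq.symm)
    simp only [List.cons_append, purgeGoA, if_neg hc, if_neg (by simp : ¬(False = True)), hcond, if_neg hcond]
    rw [ih rest (acc ++ [c]) ht]
    · simp
    · intro j hj
      have := hnm (j + 1) (by simpa using Nat.succ_lt_succ hj)
      simpa using this

theorem purgeGoA_matched (pat : List Char) : ∀ (seg rest acc : List Char) (j₀ : Nat),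
    '_' ∉ seg → j₀ < seg.length → pat <+: (seg ++ rest).drop j₀ →
    (∀ j < j₀, ¬ pat <+: (seg ++ rest).drop j) →
    purgeGoA pat (seg ++ rest) false acc = purgeGoA pat rest true (acc ++ seg.take j₀) := by
  intro seg
  induction seg with
  | nil => intro rest acc j₀ _ hj; simp at hj
  | cons c t ih =>
    intro rest acc j₀ h hj hm hmin
    have hc : c ≠ '_' := by simp at h; tauto
    have ht : '_' ∉ t := by simp at h; tauto
    cases j₀ with
    | zero =>
      have hcond : (c :: (t ++ rest)).take pat.length = pat := by
        have := List.prefix_iff_eq_take.1 (by simpa using hm)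
        exact this.symm
      simp only [List.cons_append, purgeGoA, if_neg hc, hcond, if_pos rfl]
      rw [purgeGoA_skip pat t rest acc ht]
      simp
    | succ j =>
      have h0 : ¬ pat <+: (c :: t ++ rest) := by
        have := hmin 0 (Nat.succ_pos j); simpa using this
      have hcond : ¬ ((c :: (t ++ rest)).take pat.length = pat) := by
        intro hEq; exact h0 (List.prefix_iff_eq_take.2 hEq.symm)
      simp only [List.cons_append, purgeGoA, if_neg hc, if_neg hcond]
      rw [ih rest (acc ++ [c]) j ht (by simpa using hj) (by simpa using hm)
        (fun i hi => by have := hmin (i+1) (by omega); simpa using this)]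
      simp


def mySplit : List Char → List (List Char)
  | [] => [[]]
  | c :: t => if c = '_' then [] :: mySplit t else (mySplit t).modifyHead (c :: ·)

theorem mySplit_ne_nil (l : List Char) : mySplit l ≠ [] := by
  cases l with
  | nil => simp [mySplit]
  | cons c t =>
    simp only [mySplit]
    split_ifs
    · simp
    · have := mySplit_ne_nil t
      cases h : mySplit t <;> simp_all [List.modifyHead]

theorem splitOn_go_eq : ∀ (fuel : Nat) (l cur : List Char) (acc : List (List Char)),
    l.length < fuel →
    PySem.Chars.splitOn.go ['_'] fuel l cur acc
      = acc.reverse ++ (mySplit l).modifyHead (cur.reverse ++ ·) := by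
  intro fuel
  induction fuel with
  | zero => intro l cur acc h; omega
  | succ fuel ih =>
    intro l cur acc h
    cases l with
    | nil => simp [PySem.Chars.splitOn.go, mySplit]
    | cons c t =>
      by_cases hc : c = '_'
      · subst hc
        rw [PySem.Chars.splitOn.go]
        simp only [if_true, List.isPrefixOf, BEq.rfl, Bool.true_and, List.length_singleton, List.drop_succ_cons, List.drop_zero]
        rw [ih t [] (cur.reverse :: acc) (by simpa using h)]
        cases hms : mySplit t with
        | nil => exact absurd hms (mySplit_ne_nil t)
        | cons a b => simp [mySplit, hms, List.modifyHead]
      · rw [PySem.Chars.splitOn.go]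
        have hpre : ¬ (List.isPrefixOf ['_'] (c :: t) = true) := by
          simp [List.isPrefixOf]; exact fun hh => (hc hh.symm).elim
        rw [if_neg hpre]
        rw [ih t (c :: cur) acc (by simpa using h)]
        simp only [mySplit, if_neg hc, List.modifyHead_modifyHead]
        have : (fun x => (c :: cur).reverse ++ x) = ((fun x => cur.reverse ++ x) ∘ fun x => c :: x) := by
          funext x; simp
        rw [this]

theorem splitOn_eq_mySplit (s : List Char) : PySem.Chars.splitOn s ['_'] = mySplit s := by
  rw [PySem.Chars.splitOn, splitOn_go_eq (s.length + 1) s [] [] (by omega)]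
  cases h : mySplit s with
  | nil => exact absurd h (mySplit_ne_nil s)
  | cons a b => simp [List.modifyHead]

theorem mySplit_join (l : List Char) : PySem.Chars.join ['_'] (mySplit l) = l := by
  induction l with
  | nil => simp [mySplit, PySem.Chars.join_singleton]
  | cons c t ih =>
    by_cases hc : c = '_'
    · subst hc
      cases hms : mySplit t with
      | nil => exact absurd hms (mySplit_ne_nil t)
      | cons a b =>
        rw [hms] at ih
        simp only [mySplit, if_pos rfl, hms, if_true]
        rw [PySem.Chars.join_cons_cons]
        simp [ih]
    · cases hms : mySplit t with
      | nil => exact absurd hms (mySplit_ne_nil t)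
      | cons a b =>
        rw [hms] at ih
        simp only [mySplit, if_neg hc, hms, List.modifyHead]
        cases b with
        | nil => simp_all [PySem.Chars.join_singleton]
        | cons p q =>
          rw [PySem.Chars.join_cons_cons] at ih ⊢
          simp [← ih]

theorem mySplit_no_sep (l : List Char) : ∀ seg ∈ mySplit l, '_' ∉ seg := by
  induction l with
  | nil => simp [mySplit]
  | cons c t ih =>
    by_cases hc : c = '_'
    · subst hc
      simp only [mySplit, if_pos rfl]
      intro seg hseg
      rcases List.mem_cons.1 hseg with h | h
      · simp [h]
      · exact ih seg h
    · cases hms : mySplit t with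
      | nil => exact absurd hms (mySplit_ne_nil t)
      | cons a b =>
        simp only [mySplit, if_neg hc, hms, List.modifyHead]
        intro seg hseg
        rcases List.mem_cons.1 hseg with h | h
        · subst h
          intro hmem
          rcases List.mem_cons.1 hmem with h | h
          · exact hc h.symm
          · exact ih a (hms ▸ List.mem_cons_self) h
        · exact ih seg (hms ▸ List.mem_cons_of_mem a h)


def pieceB (s pat : List Char) (k : Nat) (seg : List Char) : List Char :=
  if seg ≠ [] then
    let p := PySem.Chars.findFrom s pat (k : Int)
    if (k : Int) ≤ p ∧ p < (k : Int) + seg.length then PySem.Chars.slice seg none (some (p - (k : Int))) else seg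
  else seg

-- helper: a prefix of a drop is an infix
theorem prefix_drop_infix (pat s : List Char) (i : Nat) (h : pat <+: s.drop i) : pat <:+: s := by
  obtain ⟨t2, ht2⟩ := h
  exact ⟨s.take i, t2, by rw [List.append_assoc, ht2, List.take_append_drop]⟩

theorem pieceB_matched (s pat : List Char) (k : Nat) (seg : List Char) (j₀ : Nat)
    (hk : k ≤ s.length) (hj : j₀ < seg.length)
    (hm : pat <+: s.drop (k + j₀)) (hmin : ∀ j < j₀, ¬ pat <+: s.drop (k + j)) :
    pieceB s pat k seg = seg.take j₀ := by
  have hne : PySem.Chars.findFrom s pat (k : Int) ≠ -1 := by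
    simp only [ne_eq, PySem.Chars.findFrom_natCast_eq_neg_one_iff s pat k hk]
    push_neg
    have : pat <+: (s.drop k).drop j₀ := by rwa [List.drop_drop]
    exact prefix_drop_infix pat (s.drop k) j₀ this
  obtain ⟨hge, hpre, hminF⟩ := PySem.Chars.findFrom_natCast_spec s pat k hk hne
  set F := PySem.Chars.findFrom s pat (k : Int) with hF
  have hF0 : 0 ≤ F := le_trans (by positivity) hge
  have hkF : k ≤ F.toNat := by omega
  have h1 : ¬ (F.toNat < k + j₀) := by
    intro hlt
    exact hmin (F.toNat - k) (by omega) (by have := hpre; rwa [show k + (F.toNat - k) = F.toNat by omega])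
  have h2 : ¬ (k + j₀ < F.toNat) := by
    intro hlt
    exact hminF (k + j₀) (by omega) hlt hm
  have hFval : F = (k : Int) + j₀ := by omega
  have hsegne : seg ≠ [] := by intro hh; rw [hh] at hj; simp at hj
  rw [pieceB, if_pos hsegne]
  simp only
  rw [if_pos (by constructor <;> omega)]
  rw [show F - (k : Int) = (j₀ : Int) by omega]
  rw [PySem.Chars.slice_eq_listSlice, PySem.List.slice_to seg (by positivity)]
  simp

theorem pieceB_nomatch (s pat : List Char) (k : Nat) (seg : List Char)
    (hk : k ≤ s.length) (hnm : ∀ j < seg.length, ¬ pat <+: s.drop (k + j)) :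
    pieceB s pat k seg = seg := by
  by_cases hsegne : seg = []
  · rw [pieceB, if_neg (by simp [hsegne])]
  · rw [pieceB, if_pos hsegne]
    simp only
    by_cases hne : PySem.Chars.findFrom s pat (k : Int) = -1
    · rw [if_neg]
      rw [hne]
      rintro ⟨h1, -⟩
      omega
    · obtain ⟨hge, hpre, -⟩ := PySem.Chars.findFrom_natCast_spec s pat k hk hne
      set F := PySem.Chars.findFrom s pat (k : Int) with hF
      have hF0 : 0 ≤ F := le_trans (by positivity) hge
      have hbig : ¬ (F.toNat < k + seg.length) := by
        intro hlt
        exact hnm (F.toNat - k) (by omega)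
          (by rwa [show k + (F.toNat - k) = F.toNat by omega])
      rw [if_neg]
      rintro ⟨-, h2⟩
      omega


def piecesB (s pat : List Char) : List (List Char) → Nat → List (List Char)
  | [], _ => []
  | seg :: r, k => pieceB s pat k seg :: piecesB s pat r (k + seg.length + 1)

theorem foldB_eq (s pat : List Char) : ∀ (segs : List (List Char)) (acc : List (List Char)) (k : Nat),
    (segs.foldl (fun (st : List (List Char) × Int) seg =>
      let start := st.2
      let e : Int := start + seg.length
      let seg' :=
        if seg ≠ [] then
          let p := PySem.Chars.findFrom s pat start
          if start ≤ p ∧ p < e then PySem.Chars.slice seg none (some (p - start)) else seg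
        else seg
      (st.1 ++ [seg'], e + 1)) (acc, (k : Int))).1 = acc ++ piecesB s pat segs k := by
  intro segs
  induction segs with
  | nil => intro acc k; simp [piecesB]
  | cons seg r ih =>
    intro acc k
    rw [List.foldl_cons]
    simp only
    rw [show ((k : Int) + (seg.length : Int) + 1) = ((k + seg.length + 1 : Nat) : Int) by push_cast; ring]
    rw [ih (acc ++ [_]) (k + seg.length + 1)]
    simp only [piecesB, pieceB, List.append_assoc, List.singleton_append]

-- combined per-segment step: A's loop across one segment produces B's piece
theorem seg_step (s pat : List Char) (k : Nat) (seg rest : List Char)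
    (hk : k ≤ s.length) (hdrop : s.drop k = seg ++ rest) (hns : '_' ∉ seg) (acc : List Char) :
    ∃ b, purgeGoA pat (seg ++ rest) false acc = purgeGoA pat rest b (acc ++ pieceB s pat k seg) := by
  have habs : ∀ j, (seg ++ rest).drop j = s.drop (k + j) := by
    intro j; rw [← List.drop_drop, hdrop]
  by_cases hm : ∃ j, j < seg.length ∧ pat <+: s.drop (k + j)
  · classical
    obtain ⟨hj₀, hm₀⟩ := Nat.find_spec hm
    refine ⟨true, ?_⟩
    rw [purgeGoA_matched pat seg rest acc (Nat.find hm) hns hj₀ (by rw [habs]; exact hm₀)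
      (fun j hj => by
        rw [habs]
        intro hp
        exact Nat.find_min hm hj ⟨by omega, hp⟩)]
    rw [pieceB_matched s pat k seg (Nat.find hm) hk hj₀ hm₀
      (fun j hj => by
        intro hp
        exact Nat.find_min hm hj ⟨by omega, hp⟩)]
  · push_neg at hm
    refine ⟨false, ?_⟩
    rw [purgeGoA_copy pat seg rest acc hns
      (fun j hj => by rw [habs]; intro hp; exact (hm j hj) hp)]
    rw [pieceB_nomatch s pat k seg hk hm]

theorem main_lemma (s pat : List Char) : ∀ (segs : List (List Char)) (k : Nat),
    k ≤ s.length → s.drop k = PySem.Chars.join ['_'] segs → (∀ seg ∈ segs, '_' ∉ seg) → segs ≠ [] →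
    purgeGoA pat (s.drop k) false [] = PySem.Chars.join ['_'] (piecesB s pat segs k) := by
  intro segs
  induction segs with
  | nil => intro k _ _ _ hne; exact absurd rfl hne
  | cons seg r ih =>
    intro k hk hdrop hns _
    cases r with
    | nil =>
      rw [PySem.Chars.join_singleton] at hdrop
      simp only [piecesB, PySem.Chars.join_singleton]
      obtain ⟨b, hb⟩ := seg_step s pat k seg [] hk (by simpa using hdrop)
        (hns seg List.mem_cons_self) []
      rw [hdrop, ← List.append_nil seg, hb]
      simp [purgeGoA]
    | cons seg2 r' =>
      rw [PySem.Chars.join_cons_cons] at hdrop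
      set tail := PySem.Chars.join ['_'] (seg2 :: r') with htail
      have hdrop' : s.drop k = seg ++ ('_' :: tail) := by simpa using hdrop
      have hlen : (s.drop k).length = s.length - k := by simp
      have hk' : k + seg.length + 1 ≤ s.length := by
        rw [hdrop'] at hlen; simp at hlen; omega
      have hdtail : s.drop (k + seg.length + 1) = tail := by
        have h1 : s.drop (k + seg.length + 1) = (s.drop k).drop (seg.length + 1) := by
          rw [List.drop_drop]; ring_nf
        rw [h1, hdrop', show seg ++ '_' :: tail = (seg ++ ['_']) ++ tail by simp,
          List.drop_left' (by simp)]
      obtain ⟨b, hb⟩ := seg_step s pat k seg ('_' :: tail) hk hdrop'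
        (hns seg List.mem_cons_self) []
      rw [hdrop', hb]
      have hstep : ∀ b acc, purgeGoA pat ('_' :: tail) b acc = purgeGoA pat tail false (acc ++ ['_']) := by
        intro b acc; simp [purgeGoA]
      rw [hstep, purgeGoA_acc pat tail false]
      have ihx := ih (k + seg.length + 1) hk' (by rw [hdtail])
        (fun x hx => hns x (List.mem_cons_of_mem seg hx)) (by simp)
      rw [hdtail] at ihx
      rw [ihx]
      simp only [piecesB]
      rw [PySem.Chars.join_cons_cons]
      simp

-- ===== VERDICT (by name: the statement is the Claim_ definition above) =====
theorem purge_string_spec : Claim_equal_purge_string := by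
  intro string str_to_remove _
  unfold Spec_purge_string
  simp only [purge_string, purge_string_alt]
  rw [splitOn_eq_mySplit]
  rw [show (0 : Int) = ((0 : Nat) : Int) by norm_num]
  rw [foldB_eq string.toList str_to_remove.toList (mySplit string.toList) [] 0]
  have := main_lemma string.toList str_to_remove.toList (mySplit string.toList) 0
    (by omega) (by simpa using (mySplit_join string.toList).symm)
    (mySplit_no_sep string.toList) (mySplit_ne_nil string.toList)
  simp only [List.drop_zero] at this
  rw [List.nil_append, ← this]
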